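-- pv_equiv track=rewrite | github.com/vierui/vt2-optimization-datamodels | scripts/legacy/test_representative_weeks.py | generate_implementation_plan
-- ===== SOURCE A (Python) =====
-- def generate_implementation_plan(investment_decisions, asset_lifetimes, planning_horizon=25, start_year=2023):
--     """
--     Generate a multi-year implementation plan based on investment decisions and asset lifetimes.
--
--     Args:
--         investment_decisions: Dictionary of asset IDs and their investment decisions (1=selected, 0=not selected)
--         asset_lifetimes: Dictionary of asset IDs and their lifetimes in years
--         planning_horizon: Number of years to plan for
--         start_year: Starting year
--
--     Returns:
--         Dictionary mapping asset IDs to dictionaries of {year: action}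
--     """
--     plan = {}
--
--     for asset_id, decision in investment_decisions.items():
--         plan[asset_id] = {}
--
--         if decision == 1:  # Selected for investment
--             lifetime = asset_lifetimes.get(asset_id, 0)
--
--             if lifetime <= 0:
--                 continue  # Skip if lifetime is invalid
--
--             # Installation in the first year
--             plan[asset_id][start_year] = "Install"
--
--             # Add replacements based on lifetime
--             year = start_year + lifetime
--             while year <= start_year + planning_horizon:
--                 plan[asset_id][year] = "Replace"
--                 year += lifetime
--
--             # Add decommissioning at the end of life
--             for year in range(start_year, start_year + planning_horizon + 1):
--                 if year not in plan[asset_id] and year > start_year: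
--                     # Check if the previous year had the asset installed
--                     prev_year_installed = any(
--                         plan[asset_id].get(y) in ["Install", "Replace"]
--                         for y in range(start_year, year)
--                     )
--
--                     # Find the most recent installation year
--                     installation_years = [y for y, action in plan[asset_id].items()
--                                         if action in ["Install", "Replace"] and y < year]
--
--                     if prev_year_installed and installation_years:
--                         most_recent = max(installation_years)
--                         if year == most_recent + lifetime:
--                             plan[asset_id][year] = "Decommission"
--
--     return plan
-- ===== SOURCE B (Python) =====
-- def generate_implementation_plan(investment_decisions, asset_lifetimes, planning_horizon=25, start_year=2023):
--     """Same plan as A, built directly: Install at start_year, then Replace at every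
--     lifetime step inside the horizon.  A's decommission scan is provably unreachable
--     (every most_recent + lifetime year inside the horizon already holds a Replace)."""
--     plan = {}
--     for asset_id, decision in investment_decisions.items():
--         actions = {}
--         if decision == 1:
--             lifetime = asset_lifetimes.get(asset_id, 0)
--             if lifetime > 0:
--                 replace_years = range(start_year + lifetime, start_year + planning_horizon + 1, lifetime)
--                 actions = {start_year: "Install", **{y: "Replace" for y in replace_years}}
--         plan[asset_id] = actions
--     return plan
-- ===== Notes on version B (the rewrite author's own statement) =====
-- stated objective: faster
-- what changed: B builds each asset's schedule in one direct pass (Install plus a stepped range of Replace years) and omits A's entire decommission block, whose nested scans over every year of the horizon are proved dead code (the candidate year most_recent+lifetime is always already a Replace key or beyond the horizon).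
import Mathlib
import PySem

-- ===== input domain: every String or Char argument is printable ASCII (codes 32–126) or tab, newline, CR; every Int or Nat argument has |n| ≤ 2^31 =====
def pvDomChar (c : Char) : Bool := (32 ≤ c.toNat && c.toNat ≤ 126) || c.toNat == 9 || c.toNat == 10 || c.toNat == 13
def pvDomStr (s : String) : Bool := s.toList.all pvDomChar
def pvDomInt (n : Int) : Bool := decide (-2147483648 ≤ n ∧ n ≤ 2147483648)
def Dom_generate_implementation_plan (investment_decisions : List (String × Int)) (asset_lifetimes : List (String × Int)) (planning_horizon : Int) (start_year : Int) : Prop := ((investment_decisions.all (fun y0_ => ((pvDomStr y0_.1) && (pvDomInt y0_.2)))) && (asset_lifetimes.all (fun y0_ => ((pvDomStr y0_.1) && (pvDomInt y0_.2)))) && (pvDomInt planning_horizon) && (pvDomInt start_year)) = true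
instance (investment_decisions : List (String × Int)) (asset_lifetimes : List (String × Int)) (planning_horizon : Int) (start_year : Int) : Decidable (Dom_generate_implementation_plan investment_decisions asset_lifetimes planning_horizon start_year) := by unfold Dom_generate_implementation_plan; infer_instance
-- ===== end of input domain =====

-- ===== PORT A =====
-- B drops A's decommission scan, which is dead code; the ports agree on every input (no Pre_ needed).
-- A mutates nothing observable; equivalence is about the return value.
-- Per-asset helper of A's loop body: A writes plan[asset_id] = {} and then fills that dict in
-- place; inserting the finished inner dict once is the same (overwrite keeps position).

-- A's while loop: year <= start_year + planning_horizon, adding "Replace" and stepping by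
-- lifetime.  The 0 < L conjunct only makes the recursion total; A calls it with lifetime > 0.
def whileReplaceA (limit L year : Int) (d : PySem.Dict Int String) : PySem.Dict Int String :=
  if h : year ≤ limit ∧ 0 < L then
    whileReplaceA limit L (year + L) (d.insert year "Replace")
  else d
termination_by (limit + 1 - year).toNat
decreasing_by omega

-- One iteration of A's decommission for-loop, step for step.
def decomStepA (sy L : Int) (d : PySem.Dict Int String) (year : Int) : PySem.Dict Int String :=
  if d.contains year = false ∧ year > sy then
    let prev_year_installed :=
      (PySem.List.pyRange sy year 1).any
        (fun y => decide (d.get? y = some "Install" ∨ d.get? y = some "Replace"))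
    let installation_years :=
      (d.items.filter (fun p => decide ((p.2 = "Install" ∨ p.2 = "Replace") ∧ p.1 < year))).map Prod.fst
    if prev_year_installed = true ∧ installation_years ≠ [] then
      match PySem.List.max? installation_years (fun y => y) with
      | some most_recent =>
        if year = most_recent + L then d.insert year "Decommission" else d
      | none => d
    else d
  else d

def assetDictA (asset_lifetimes : List (String × Int)) (planning_horizon start_year : Int)
    (p : String × Int) : PySem.Dict Int String :=
  if p.2 = 1 then
    let lifetime := (PySem.Dict.ofList asset_lifetimes).getD p.1 0
    if lifetime ≤ 0 then PySem.Dict.empty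
    else
      let d1 := (PySem.Dict.empty : PySem.Dict Int String).insert start_year "Install"
      let d2 := whileReplaceA (start_year + planning_horizon) lifetime (start_year + lifetime) d1
      (PySem.List.pyRange start_year (start_year + planning_horizon + 1) 1).foldl
        (decomStepA start_year lifetime) d2
  else PySem.Dict.empty

def generate_implementation_plan (investment_decisions : List (String × Int)) (asset_lifetimes : List (String × Int)) (planning_horizon : Int) (start_year : Int) : List (String × List (Int × String)) :=
  let plan :=
    (PySem.Dict.ofList investment_decisions).items.foldl
      (fun (plan : PySem.Dict String (PySem.Dict Int String)) p =>
        plan.insert p.1 (assetDictA asset_lifetimes planning_horizon start_year p))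
      PySem.Dict.empty
  plan.items.map (fun q => (q.1, q.2.items))

-- ===== PORT B =====
-- B: each asset's action dict written directly as Install at start_year followed by the
-- stepped range of Replace years (the {start_year: "Install", **{...}} literal of Source B).
def assetListB (asset_lifetimes : List (String × Int)) (planning_horizon start_year : Int)
    (p : String × Int) : List (Int × String) :=
  if p.2 = 1 then
    let lifetime := (PySem.Dict.ofList asset_lifetimes).getD p.1 0
    if 0 < lifetime then
      (start_year, "Install") ::
        (PySem.List.pyRange (start_year + lifetime) (start_year + planning_horizon + 1) lifetime).map
          (fun y => (y, "Replace"))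
    else []
  else []

def generate_implementation_plan_alt (investment_decisions : List (String × Int)) (asset_lifetimes : List (String × Int)) (planning_horizon : Int) (start_year : Int) : List (String × List (Int × String)) :=
  (PySem.Dict.ofList investment_decisions).items.map
    (fun p => (p.1, assetListB asset_lifetimes planning_horizon start_year p))

-- ===== PRECONDITION & SPEC =====
def Spec_generate_implementation_plan (investment_decisions : List (String × Int)) (asset_lifetimes : List (String × Int)) (planning_horizon : Int) (start_year : Int) (out : List (String × List (Int × String))) : Prop := out = generate_implementation_plan_alt investment_decisions asset_lifetimes planning_horizon start_year
instance (investment_decisions : List (String × Int)) (asset_lifetimes : List (String × Int)) (planning_horizon : Int) (start_year : Int) (out : List (String × List (Int × String))) : Decidable (Spec_generate_implementation_plan investment_decisions asset_lifetimes planning_horizon start_year out) := by unfold Spec_generate_implementation_plan; infer_instance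

-- ===== CLAIM (what is proved, stated in full; the proofs are below) =====
def Claim_equal_generate_implementation_plan : Prop := ∀ (investment_decisions : List (String × Int)) (asset_lifetimes : List (String × Int)) (planning_horizon : Int) (start_year : Int), Dom_generate_implementation_plan investment_decisions asset_lifetimes planning_horizon start_year → Spec_generate_implementation_plan investment_decisions asset_lifetimes planning_horizon start_year (generate_implementation_plan investment_decisions asset_lifetimes planning_horizon start_year)

-- ===== LEMMAS AND PROOFS =====

-- l.foldl f b = b when every step fixes b
theorem foldl_fixed {alpha beta : Type} (f : beta -> alpha -> beta) (b : beta) (l : List alpha)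
    (h : forall a, a ∈ l -> f b a = b) : l.foldl f b = b := by
  induction l with
  | nil => rfl
  | cons x xs ih =>
    simp only [List.foldl_cons, h x (by simp)]
    exact ih (fun a ha => h a (by simp [ha]))

-- pyRange with a positive step unfolds one element at a time
theorem pyRange_pos_cons (a b s : Int) (hs : 0 < s) :
    PySem.List.pyRange a b s = if a < b then a :: PySem.List.pyRange (a + s) b s else [] := by
  rw [PySem.List.pyRange_of_pos a b hs, PySem.List.pyRange_of_pos (a + s) b hs]
  by_cases hab : a < b
  · simp only [hab, if_true]
    have h1 : b - a + s - 1 = (b - a - 1) + 1 * s := by ring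
    have h2 : (b - a + s - 1) / s = (b - a - 1) / s + 1 := by
      rw [h1, Int.add_mul_ediv_right _ _ (by omega : s ≠ 0)]
    have hnn : 0 ≤ (b - a - 1) / s := Int.ediv_nonneg (by omega) (by omega)
    have h3 : ((b - a + s - 1) / s).toNat = ((b - a - 1) / s).toNat + 1 := by omega
    have h4 : (if a + s < b then ((b - (a + s) + s - 1) / s).toNat else 0)
        = ((b - a - 1) / s).toNat := by
      by_cases h : a + s < b
      · simp only [h, if_true]; congr 1; ring_nf
      · have h0 : (b - a - 1) / s = 0 :=
          Int.ediv_eq_zero_of_lt (by omega) (by omega)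
        simp [h, h0]
    rw [h3, h4, List.range_succ_eq_map]
    simp only [List.map_cons, List.map_map]
    congr 1
    · simp
    · apply List.map_congr_left; intro k _
      simp only [Function.comp]
      push_cast; ring
  · simp [hab]

-- pyRange with a positive step is strictly increasing, hence nodup
theorem pyRange_pos_pairwise (a b s : Int) (hs : 0 < s) :
    (PySem.List.pyRange a b s).Pairwise (· < ·) := by
  rw [PySem.List.pyRange_of_pos a b hs]
  refine List.Pairwise.map _ (fun k k' (h : k < k') => ?_) (List.pairwise_lt_range)
  have : (k : Int) < (k' : Int) := by exact_mod_cast h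
  nlinarith

-- folding fresh inserts appends the new pairs in order
theorem foldl_insert_fresh {kappa nu mu : Type} [BEq kappa] [LawfulBEq kappa]
    (g : mu -> kappa) (f : mu -> nu) (ys : List mu) (d : PySem.Dict kappa nu)
    (hn : (ys.map g).Nodup) (hf : forall y, y ∈ ys -> d.contains (g y) = false) :
    (ys.foldl (fun d y => d.insert (g y) (f y)) d).items
      = d.items ++ ys.map (fun y => (g y, f y)) := by
  induction ys generalizing d with
  | nil => simp
  | cons y ys ih =>
    simp only [List.map_cons, List.nodup_cons] at hn
    simp only [List.foldl_cons, List.map_cons]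
    rw [ih (d.insert (g y) (f y)) hn.2 (fun z hz => by
      rw [PySem.Dict.contains_insert]
      have hne : (g z == g y) = false := by
        simp only [beq_eq_false_iff_ne, ne_eq]
        intro h; exact hn.1 (h ▸ List.mem_map_of_mem hz)
      rw [hne]
      simp [hf z (by simp [hz])])]
    rw [PySem.Dict.items_insert_of_not_contains d (f y) (hf y (by simp))]
    simp

-- A's while loop is a fold of fresh Replace inserts over the stepped range
theorem whileReplaceA_items (limit L year : Int) (hL : 0 < L) (d : PySem.Dict Int String)
    (hf : forall y, y ∈ PySem.List.pyRange year (limit + 1) L -> d.contains y = false) :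
    (whileReplaceA limit L year d).items
      = d.items ++ (PySem.List.pyRange year (limit + 1) L).map (fun y => (y, "Replace")) := by
  have key : whileReplaceA limit L year d
      = (PySem.List.pyRange year (limit + 1) L).foldl (fun d y => d.insert y "Replace") d := by
    clear hf
    induction year, d using whileReplaceA.induct limit L with
    | case1 year d h ih =>
      rw [whileReplaceA, dif_pos h, ih, pyRange_pos_cons year (limit + 1) L h.2]
      simp [show year < limit + 1 by omega]
    | case2 year d h =>
      rw [whileReplaceA, dif_neg h]
      rw [pyRange_pos_cons year (limit + 1) L hL]
      simp [show ¬ year < limit + 1 by omega]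
  rw [key]
  exact foldl_insert_fresh (fun y => y) (fun _ => "Replace") _ d
    (by simpa using (pyRange_pos_pairwise year (limit + 1) L hL).nodup) hf

-- A's decommission step never changes the finished dict
theorem decomStepA_fixed (sy L ph year : Int) (hL : 0 < L)
    (d : PySem.Dict Int String)
    (hitems : d.items = (sy, "Install") ::
        (PySem.List.pyRange (sy + L) (sy + ph + 1) L).map (fun z => (z, "Replace")))
    (hy : sy ≤ year ∧ year < sy + ph + 1) :
    decomStepA sy L d year = d := by
  unfold decomStepA
  by_cases hc : d.contains year = false ∧ year > sy
  · rw [if_pos hc]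
    by_cases hgo : ((PySem.List.pyRange sy year 1).any
          (fun y => decide (d.get? y = some "Install" ∨ d.get? y = some "Replace"))) = true ∧
        ((d.items.filter (fun p => decide ((p.2 = "Install" ∨ p.2 = "Replace") ∧ p.1 < year))).map Prod.fst) ≠ []
    · rw [if_pos hgo]
      rcases hm : PySem.List.max? ((d.items.filter
          (fun p => decide ((p.2 = "Install" ∨ p.2 = "Replace") ∧ p.1 < year))).map Prod.fst)
          (fun y => y) with _ | m
      · rw [hm]
      · rw [hm]
        show (if year = m + L then d.insert year "Decommission" else d) = d
        rw [if_neg ?_]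
        intro hEq
        -- m is a key of d; year = m + L would then again be a key of d, contradicting hc.1
        rcases List.mem_map.mp (PySem.List.max?_mem hm) with ⟨p, hp, hpe⟩
        have hpd := List.mem_of_mem_filter hp
        rw [hitems] at hpd
        have hkey : p.1 = sy ∨ (sy + L ≤ p.1 ∧ p.1 < sy + ph + 1 ∧ L ∣ p.1 - (sy + L)) := by
          rw [List.mem_cons] at hpd
          rcases hpd with h | h
          · left; rw [h]
          · rcases List.mem_map.mp h with ⟨z, hz, hze⟩
            right
            have hze2 : (z, "Replace") = p := hze
            rw [PySem.List.mem_pyRange_iff_of_pos hL] at hz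
            rw [← hze2]
            exact hz
        have hyv : year = p.1 + L := by rw [hEq, hpe]
        have hyk : sy + L ≤ year ∧ year < sy + ph + 1 ∧ L ∣ year - (sy + L) := by
          rcases hkey with h | h
          · exact ⟨by omega, hy.2, ⟨0, by rw [hyv, h]; ring⟩⟩
          · refine ⟨by omega, hy.2, ?_⟩
            rcases h.2.2 with ⟨c, hc'⟩
            exact ⟨c + 1, by rw [hyv, mul_add, mul_one, ← hc']; ring⟩
        have hct : d.contains year = true := by
          have hmem2 : year ∈ PySem.List.pyRange (sy + L) (sy + ph + 1) L :=
            (PySem.List.mem_pyRange_iff_of_pos hL year).mpr hyk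
          show (d.items.any fun p => p.1 == year) = true
          rw [hitems]
          simp only [List.any_cons, List.any_map, Bool.or_eq_true, List.any_eq_true]
          right
          exact ⟨year, hmem2, by simp⟩
        rw [hc.1] at hct
        simp at hct
    · rw [if_neg hgo]
  · rw [if_neg hc]

-- the two per-asset computations agree
theorem asset_eq (al : List (String × Int)) (ph sy : Int) (p : String × Int) :
    (assetDictA al ph sy p).items = assetListB al ph sy p := by
  unfold assetDictA assetListB
  by_cases h1 : p.2 = 1
  · simp only [h1, if_true]
    generalize (PySem.Dict.ofList al).getD p.1 0 = L
    by_cases h2 : L ≤ 0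
    · rw [if_pos h2, if_neg (by omega)]; rfl
    · have hL : 0 < L := by omega
      rw [if_neg h2, if_pos hL]
      have hfresh : forall y, y ∈ PySem.List.pyRange (sy + L) (sy + ph + 1) L ->
          (((PySem.Dict.empty : PySem.Dict Int String).insert sy "Install")).contains y = false := by
        intro y hy
        rw [PySem.List.mem_pyRange_iff_of_pos hL] at hy
        show ([((sy : Int), "Install")].any fun p => p.1 == y) = false
        simp; omega
      have hitems : (whileReplaceA (sy + ph) L (sy + L)
          ((PySem.Dict.empty : PySem.Dict Int String).insert sy "Install")).items
          = (sy, "Install") ::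
            (PySem.List.pyRange (sy + L) (sy + ph + 1) L).map (fun z => (z, "Replace")) := by
      
        rw [whileReplaceA_items (sy + ph) L (sy + L) hL _ hfresh]
        rfl
      rw [foldl_fixed _ _ _ (fun year hyear => decomStepA_fixed sy L ph year hL _ hitems
        (by rwa [PySem.List.mem_pyRange_one] at hyear))]
      exact hitems
  · simp only [h1, if_false]
    rfl

-- ===== VERDICT (by name: the statement is the Claim_ definition above) =====
theorem generate_implementation_plan_spec : Claim_equal_generate_implementation_plan := by
  intro inv al ph sy _
  show _ = _
  unfold generate_implementation_plan generate_implementation_plan_alt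
  show ((PySem.Dict.ofList inv).items.foldl _ PySem.Dict.empty).items.map _ = _
  rw [foldl_insert_fresh Prod.fst (assetDictA al ph sy) _ PySem.Dict.empty
    (by simpa [PySem.Dict.keys] using PySem.Dict.nodup_keys_ofList inv)
    (fun y _ => by rfl)]
  rw [show (PySem.Dict.empty : PySem.Dict String (PySem.Dict Int String)).items = [] from rfl]
  simp only [List.nil_append, List.map_map]
  apply List.map_congr_left
  intro q _
  simp only [Function.comp_apply]
  rw [asset_eq al ph sy q]
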